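-- pv_equiv track=rewrite | github.com/RT-Thread/IoT_Board | examples/31_micropython/packages/adbd-v1.1.0/tools/script/adb_transfer.py | get_transfer_err
-- ===== SOURCE A (Python) =====
-- def get_transfer_err(adb_out):
--     adb_out = adb_out.split('\n')
--     err_index = -1
--     out_str = None
--     for i in adb_out:
--         err_index = i.find('adb: error:')
--         if err_index >= 0:
--             out_str = i[err_index + len('adb: error:') : ]
--             break
--     return out_str
-- ===== SOURCE B (Python) =====
-- def get_transfer_err(adb_out):
--     idx = adb_out.find('adb: error:')
--     if idx < 0:
--         return None
--     start = idx + len('adb: error:')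
--     nl = adb_out.find('\n', start)
--     return adb_out[start:] if nl < 0 else adb_out[start:nl]
-- ===== Notes on version B (the rewrite author's own statement) =====
-- stated objective: simpler
-- what changed: B drops the split-into-lines loop entirely: one global find of the error marker over the whole string, then a find of the next newline and a single slice, instead of building the line list and scanning each line with a per-line find.
import Mathlib
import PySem

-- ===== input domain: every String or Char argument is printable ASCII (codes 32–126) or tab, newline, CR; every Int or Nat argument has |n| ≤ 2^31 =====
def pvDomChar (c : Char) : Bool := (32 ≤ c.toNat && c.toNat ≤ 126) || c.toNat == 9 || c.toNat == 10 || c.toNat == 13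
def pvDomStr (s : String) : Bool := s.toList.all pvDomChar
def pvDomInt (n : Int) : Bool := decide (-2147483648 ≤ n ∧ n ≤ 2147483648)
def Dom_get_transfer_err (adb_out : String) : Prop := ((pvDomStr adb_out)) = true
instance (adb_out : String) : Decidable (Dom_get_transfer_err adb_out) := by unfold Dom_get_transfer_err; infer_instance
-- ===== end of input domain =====

-- B replaces A's split-into-lines-and-scan loop by a single global find of 'adb: error:'
-- plus a find of the following newline and one slice (objective: simpler; same O(n) cost).

-- ===== PORT A =====
-- the for-loop over the lines of adb_out.split('\n'), breaking at the first line containing the pattern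
def getTransferErrLoop : List (List Char) → Option (List Char)
  | [] => none
  | i :: rest =>
    let errIndex := PySem.Chars.find i "adb: error:".toList
    if 0 ≤ errIndex then
      some (PySem.Chars.slice i (some (errIndex + (PySem.Chars.len "adb: error:".toList : Int))) none)
    else getTransferErrLoop rest

def get_transfer_err (adb_out : String) : Option String :=
  (getTransferErrLoop (PySem.Chars.splitOn adb_out.toList "\n".toList)).map String.ofList

-- ===== PORT B =====
def get_transfer_err_alt (adb_out : String) : Option String :=
  let s := adb_out.toList
  let idx := PySem.Chars.find s "adb: error:".toList
  if idx < 0 then none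
  else
    let start := idx + (PySem.Chars.len "adb: error:".toList : Int)
    let nl := PySem.Chars.findFrom s "\n".toList start none
    if nl < 0 then some (String.ofList (PySem.Chars.slice s (some start) none))
    else some (String.ofList (PySem.Chars.slice s (some start) (some nl)))

-- ===== PRECONDITION & SPEC =====
def Spec_get_transfer_err (adb_out : String) (out : Option String) : Prop := out = get_transfer_err_alt adb_out
instance (adb_out : String) (out : Option String) : Decidable (Spec_get_transfer_err adb_out out) := by unfold Spec_get_transfer_err; infer_instance

-- ===== CLAIM (what is proved, stated in full; the proofs are below) =====
def Claim_equal_get_transfer_err : Prop := ∀ (adb_out : String), Dom_get_transfer_err adb_out → Spec_get_transfer_err adb_out (get_transfer_err adb_out)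

-- ===== LEMMAS AND PROOFS =====

-- the search pattern, as a list of characters (proof-side shorthand)
def errPat : List Char := "adb: error:".toList

theorem errPat_nl_notMem : '\n' ∉ errPat := by decide

-- reference line splitter: splitNl cs is cs.split('\n')
def splitNl : List Char → List (List Char)
  | [] => [[]]
  | c :: rest => if c = '\n' then [] :: splitNl rest else (splitNl rest).modifyHead (c :: ·)

-- joining the lines back with '\n'
def joinNl : List (List Char) → List Char
  | [] => []
  | [l] => l
  | l :: ls => l ++ '\n' :: joinNl ls

-- B's computation on the character list (no String wrapping)
def bCore (s : List Char) : Option (List Char) :=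
  let idx := PySem.Chars.find s "adb: error:".toList
  if idx < 0 then none
  else
    let start := idx + (PySem.Chars.len "adb: error:".toList : Int)
    let nl := PySem.Chars.findFrom s "\n".toList start none
    if nl < 0 then some (PySem.Chars.slice s (some start) none)
    else some (PySem.Chars.slice s (some start) (some nl))

theorem alt_eq_bCore (adb_out : String) :
    get_transfer_err_alt adb_out = (bCore adb_out.toList).map String.ofList := by
  simp only [get_transfer_err_alt, bCore, apply_ite (Option.map String.ofList),
    Option.map_some, Option.map_none]

theorem splitOn_go_eq (l : List Char) (cur : List Char) (acc : List (List Char)) (fuel : Nat)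
    (h : l.length < fuel) :
    PySem.Chars.splitOn.go ['\n'] fuel l cur acc
      = acc.reverse ++ (splitNl l).modifyHead (cur.reverse ++ ·) := by
  induction l generalizing fuel cur acc with
  | nil =>
    obtain ⟨f, rfl⟩ : ∃ f, fuel = f + 1 := ⟨fuel - 1, by omega⟩
    simp [PySem.Chars.splitOn.go, splitNl]
  | cons c rest ih =>
    obtain ⟨f, rfl⟩ : ∃ f, fuel = f + 1 := ⟨fuel - 1, by omega⟩
    rw [PySem.Chars.splitOn.go]
    by_cases hc : c = '\n'
    · subst hc
      simp only [List.isPrefixOf, Bool.and_true]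
      rw [if_pos (by simp)]
      simp only [List.length_singleton, List.drop_succ_cons, List.drop_zero]
      rw [ih [] (cur.reverse :: acc) f (by simp at h; omega)]
      cases hsp : splitNl rest <;> simp [splitNl, hsp]
    · have hp : List.isPrefixOf ['\n'] (c :: rest) = false := by
        simp [List.isPrefixOf, Ne.symm hc]
      rw [hp]
      simp only [Bool.false_eq_true, if_false]
      rw [ih (c :: cur) acc f (by simp at h ⊢; omega)]
      simp only [splitNl, if_neg hc]
      congr 1
      rw [List.modifyHead_modifyHead]
      congr 1
      funext x
      simp

theorem splitOn_eq_splitNl (cs : List Char) :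
    PySem.Chars.splitOn cs ['\n'] = splitNl cs := by
  simp only [PySem.Chars.splitOn]
  rw [splitOn_go_eq cs [] [] (cs.length + 1) (by omega)]
  cases h : splitNl cs <;> simp

theorem splitNl_ne_nil (cs : List Char) : splitNl cs ≠ [] := by
  induction cs with
  | nil => simp [splitNl]
  | cons c r ih =>
    simp only [splitNl]
    split
    · simp
    · cases h : splitNl r with
      | nil => exact absurd h ih
      | cons a t => simp

theorem nl_notMem_of_mem_splitNl {cs : List Char} {l : List Char} (h : l ∈ splitNl cs) :
    '\n' ∉ l := by
  induction cs generalizing l with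
  | nil => simp [splitNl] at h; simp [h]
  | cons c r ih =>
    simp only [splitNl] at h
    split at h
    · rcases List.mem_cons.1 h with rfl | h
      · simp
      · exact ih h
    · rename_i hc
      cases hr : splitNl r with
      | nil => exact absurd hr (splitNl_ne_nil r)
      | cons a t =>
        rw [hr] at h
        rcases List.mem_cons.1 h with rfl | h
        · intro hm
          rcases List.mem_cons.1 hm with h' | h'
          · exact hc h'.symm
          · exact ih (hr ▸ List.mem_cons_self) h'
        · exact ih (hr ▸ List.mem_cons_of_mem a h)

theorem joinNl_splitNl (cs : List Char) : joinNl (splitNl cs) = cs := by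
  induction cs with
  | nil => simp [splitNl, joinNl]
  | cons c r ih =>
    simp only [splitNl]
    split
    · rename_i hc
      subst hc
      cases hr : splitNl r with
      | nil => exact absurd hr (splitNl_ne_nil r)
      | cons a t => rw [hr] at ih; simp [joinNl, ih]
    · cases hr : splitNl r with
      | nil => exact absurd hr (splitNl_ne_nil r)
      | cons a t =>
        rw [hr] at ih
        cases t with
        | nil => simp [joinNl] at ih ⊢; simp [ih]
        | cons b t' => simp [joinNl] at ih ⊢; simp [ih]

theorem find_eq_of_min {cs sub : List Char} {k : Nat}
    (h1 : sub <+: cs.drop k) (h2 : ∀ i < k, ¬ sub <+: cs.drop i) :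
    PySem.Chars.find cs sub = (k : Int) := by
  have hinf : sub <:+: cs := h1.isInfix.trans (List.drop_suffix k cs).isInfix
  have h0 : 0 ≤ PySem.Chars.find cs sub := (PySem.Chars.find_nonneg_iff _ _).2 hinf
  obtain ⟨hp, hmin⟩ := PySem.Chars.find_spec h0
  rcases lt_trichotomy (PySem.Chars.find cs sub).toNat k with hlt | heq | hgt
  · exact absurd hp (h2 _ hlt)
  · omega
  · exact absurd h1 (hmin k hgt)

theorem prefix_of_prefix_append_cons {sub a b : List Char} (hnp : '\n' ∉ sub)
    (h : sub <+: a ++ '\n' :: b) : sub <+: a := by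
  rcases Nat.lt_or_ge a.length sub.length with hlt | hle; swap
  · rw [List.prefix_iff_eq_take] at h ⊢
    rw [h, List.take_append_of_le_length hle]
    simp [List.length_take, Nat.min_eq_left hle]
  · exfalso
    apply hnp
    have hlen : a.length < sub.length := hlt
    have hlen2 : sub.length ≤ (a ++ '\n' :: b).length := h.length_le
    have hget := h.getElem (i := a.length) hlen
    rw [List.getElem_append_right (le_refl a.length)] at hget
    simp at hget
    rw [← hget]
    exact List.getElem_mem _

theorem find_nl_of_notMem {u : List Char} (hu : '\n' ∉ u) :
    PySem.Chars.find u ['\n'] = -1 := by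
  rw [PySem.Chars.find_eq_neg_one_iff]
  intro hinf
  exact hu (hinf.subset (by simp))

theorem find_nl_append {u : List Char} (v : List Char) (hu : '\n' ∉ u) :
    PySem.Chars.find (u ++ '\n' :: v) ['\n'] = (u.length : Int) := by
  apply find_eq_of_min (k := u.length)
  · rw [List.drop_left]
    exact ⟨v, rfl⟩
  · intro i hi hpre
    rw [List.drop_append_of_le_length (by omega)] at hpre
    obtain ⟨t, ht⟩ := hpre
    cases hd : u.drop i with
    | nil => rw [List.drop_eq_nil_iff] at hd; omega
    | cons d ds =>
      rw [hd] at ht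
      simp at ht
      apply hu
      have : d ∈ u := (List.drop_subset i u) (hd ▸ List.mem_cons_self)
      rw [← ht.1] at this
      exact this

theorem find_pat_left {u : List Char} (v : List Char)
    (h : 0 ≤ PySem.Chars.find u errPat) :
    PySem.Chars.find (u ++ '\n' :: v) errPat = PySem.Chars.find u errPat := by
  obtain ⟨hp, hmin⟩ := PySem.Chars.find_spec h
  have hk : (PySem.Chars.find u errPat).toNat ≤ u.length := by
    have := PySem.Chars.find_le_length (s := u) (sub := errPat)
    omega
  rw [find_eq_of_min (k := (PySem.Chars.find u errPat).toNat)]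
  · omega
  · rw [List.drop_append_of_le_length hk]
    exact hp.trans (List.prefix_append _ _)
  · intro i hi hpre
    rw [List.drop_append_of_le_length (by omega)] at hpre
    exact hmin i hi (prefix_of_prefix_append_cons errPat_nl_notMem hpre)

theorem find_pat_none {u v : List Char} (hu : ¬ errPat <:+: u) (hv : ¬ errPat <:+: v) :
    PySem.Chars.find (u ++ '\n' :: v) errPat = -1 := by
  rw [PySem.Chars.find_eq_neg_one_iff]
  intro hinf
  have : PySem.Chars.isIn errPat (u ++ '\n' :: v) = true :=
    (PySem.Chars.isIn_iff_infix _ _).2 hinf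
  obtain ⟨j, hj⟩ := (PySem.Chars.exists_prefix_drop_iff_isIn _ _).2 this
  rcases Nat.lt_or_ge u.length j with hgt | hle; swap
  · rw [List.drop_append_of_le_length hle] at hj
    have := prefix_of_prefix_append_cons errPat_nl_notMem hj
    exact hu (this.isInfix.trans (List.drop_suffix j u).isInfix)
  · have hj' : errPat <+: v.drop (j - u.length - 1) := by
      have he : u ++ '\n' :: v = (u ++ ['\n']) ++ v := by simp
      have hjj : j = (u ++ ['\n']).length + (j - u.length - 1) := by simp; omega
      rw [he, hjj, List.drop_length_add_append] at hj
      exact hj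
    exact hv (hj'.isInfix.trans (List.drop_suffix _ v).isInfix)

theorem find_pat_right {u v : List Char} (hu : ¬ errPat <:+: u)
    (h : 0 ≤ PySem.Chars.find v errPat) :
    PySem.Chars.find (u ++ '\n' :: v) errPat = (u.length : Int) + 1 + PySem.Chars.find v errPat := by
  obtain ⟨hp, hmin⟩ := PySem.Chars.find_spec h
  rw [find_eq_of_min (k := u.length + 1 + (PySem.Chars.find v errPat).toNat)]
  · omega
  · have he : u ++ '\n' :: v = (u ++ ['\n']) ++ v := by simp
    have hk : u.length + 1 + (PySem.Chars.find v errPat).toNat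
        = (u ++ ['\n']).length + (PySem.Chars.find v errPat).toNat := by simp
    rw [he, hk, List.drop_length_add_append]
    exact hp
  · intro i hi hpre
    rcases Nat.lt_or_ge u.length i with hgt | hle; swap
    · rw [List.drop_append_of_le_length hle] at hpre
      exact hu ((prefix_of_prefix_append_cons errPat_nl_notMem hpre).isInfix.trans
        (List.drop_suffix i u).isInfix)
    · have he : u ++ '\n' :: v = (u ++ ['\n']) ++ v := by simp
      have hii : i = (u ++ ['\n']).length + (i - u.length - 1) := by simp; omega
      rw [he, hii, List.drop_length_add_append] at hpre
      exact hmin (i - u.length - 1) (by omega) hpre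


theorem errPat_eq : "adb: error:".toList = errPat := rfl
theorem nlStr_eq : "\n".toList = ['\n'] := rfl
theorem errPat_len_int : (PySem.Chars.len errPat : Int) = ((11:Nat) : Int) := by decide
theorem errPat_length : errPat.length = 11 := by decide

-- pattern found at e in l: e.toNat + 11 ≤ l.length
theorem find_add_pat_le {l : List Char} (h : 0 ≤ PySem.Chars.find l errPat) :
    (PySem.Chars.find l errPat).toNat + 11 ≤ l.length := by
  have hp := (PySem.Chars.find_spec h).1
  have := hp.length_le
  simp [errPat_length] at this
  have hle := PySem.Chars.find_le_length (s := l) (sub := errPat)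
  omega

theorem not_infix_of_find_neg {l : List Char} (h : ¬ 0 ≤ PySem.Chars.find l errPat) :
    ¬ errPat <:+: l := by
  intro hinf
  exact h ((PySem.Chars.find_nonneg_iff _ _).2 hinf)

theorem nl_drop_notMem {l : List Char} (hl : '\n' ∉ l) (k : Nat) : '\n' ∉ l.drop k :=
  fun hm => hl (List.drop_subset k l hm)

theorem loop_eq_bCore : ∀ ls : List (List Char), ls ≠ [] → (∀ l ∈ ls, '\n' ∉ l) →
    getTransferErrLoop ls = bCore (joinNl ls) := by
  intro ls
  induction ls with
  | nil => intro h; exact absurd rfl h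
  | cons l ls ih =>
    intro _ hlines
    have hl : '\n' ∉ l := hlines l List.mem_cons_self
    cases ls with
    | nil =>
      show getTransferErrLoop [l] = bCore (joinNl [l])
      simp only [joinNl, getTransferErrLoop, bCore, errPat_eq, nlStr_eq, errPat_len_int]
      by_cases hf : 0 ≤ PySem.Chars.find l errPat
      · rw [if_pos hf, if_neg (by omega)]
        set e := PySem.Chars.find l errPat with he
        have hk : e.toNat + 11 ≤ l.length := find_add_pat_le hf
        have hcast : e + ((11:Nat) : Int) = ((e.toNat + 11 : Nat) : Int) := by push_cast; omega
        rw [hcast, PySem.Chars.findFrom_natCast l ['\n'] (e.toNat + 11) hk,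
          find_nl_of_notMem (nl_drop_notMem hl _),
          if_pos (rfl : (-1 : Int) = -1), if_pos (show (-1 : Int) < 0 by norm_num)]
      · rw [if_neg hf, if_pos (show PySem.Chars.find l errPat < 0 by omega)]
    | cons l₂ t =>
      have hrest : getTransferErrLoop (l₂ :: t) = bCore (joinNl (l₂ :: t)) :=
        ih (by simp) (fun x hx => hlines x (List.mem_cons_of_mem l hx))
      have hjoin : joinNl (l :: l₂ :: t) = l ++ '\n' :: joinNl (l₂ :: t) := rfl
      set v := joinNl (l₂ :: t) with hv
      have hstep : getTransferErrLoop (l :: l₂ :: t)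
          = if 0 ≤ PySem.Chars.find l "adb: error:".toList then
              some (PySem.Chars.slice l
                (some (PySem.Chars.find l "adb: error:".toList
                  + (PySem.Chars.len "adb: error:".toList : Int))) none)
            else getTransferErrLoop (l₂ :: t) := rfl
      show getTransferErrLoop (l :: l₂ :: t) = bCore (joinNl (l :: l₂ :: t))
      rw [hjoin, hstep]
      by_cases hf : 0 ≤ PySem.Chars.find l errPat
      · -- found in the first line
        rw [if_pos (by exact hf)]
        simp only [bCore, errPat_eq, nlStr_eq, errPat_len_int]
        rw [find_pat_left v hf, if_neg (by omega)]
        set e := PySem.Chars.find l errPat with he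
        have hk : e.toNat + 11 ≤ l.length := find_add_pat_le hf
        have hlen : e.toNat + 11 ≤ (l ++ '\n' :: v).length := by
          simp only [List.length_append, List.length_cons]; omega
        have hcast : e + ((11:Nat) : Int) = ((e.toNat + 11 : Nat) : Int) := by push_cast; omega
        rw [hcast, PySem.Chars.findFrom_natCast _ ['\n'] (e.toNat + 11) hlen]
        rw [List.drop_append_of_le_length hk, find_nl_append v (nl_drop_notMem hl _),
          if_neg (show ¬(((l.drop (e.toNat + 11)).length : Int) = -1) by omega)]
        have harith : ((e.toNat + 11 : Nat) : Int) + ((l.drop (e.toNat + 11)).length : Int)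
            = ((l.length : Nat) : Int) := by rw [List.length_drop]; push_cast; omega
        rw [harith, if_neg (show ¬(((l.length : Nat) : Int) < 0) by omega)]
        have hA : PySem.Chars.slice l (some ((e.toNat + 11 : Nat) : Int)) none
            = l.drop (e.toNat + 11) := by
          simp only [PySem.Chars.slice_eq_listSlice, PySem.List.slice_from_natCast]
        have hB : PySem.Chars.slice (l ++ '\n' :: v) (some ((e.toNat + 11 : Nat) : Int))
              (some ((l.length : Nat) : Int)) = l.drop (e.toNat + 11) := by
          simp only [PySem.Chars.slice_eq_listSlice, PySem.List.slice_natCast]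
          rw [List.drop_append_of_le_length hk]
          rw [List.take_left' (by simp)]
        rw [hA, hB]
      · -- not found in the first line
        rw [if_neg (by exact hf), hrest]
        have hninf : ¬ errPat <:+: l := not_infix_of_find_neg hf
        simp only [bCore, errPat_eq, nlStr_eq, errPat_len_int]
        by_cases hg : 0 ≤ PySem.Chars.find v errPat
        · rw [find_pat_right hninf hg,
            if_neg (show ¬((l.length : Int) + 1 + PySem.Chars.find v errPat < 0) by omega),
            if_neg (show ¬(PySem.Chars.find v errPat < 0) by omega)]
          set f := PySem.Chars.find v errPat with hfv
          have hkf : f.toNat + 11 ≤ v.length := find_add_pat_le hg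
          set K : Nat := l.length + 1 + (f.toNat + 11) with hK
          have hcast1 : (l.length : Int) + 1 + f + ((11:Nat) : Int) = ((K : Nat) : Int) := by
            rw [hK]; push_cast; omega
          have hcast2 : f + ((11:Nat) : Int) = ((f.toNat + 11 : Nat) : Int) := by push_cast; omega
          have hKlen : K ≤ (l ++ '\n' :: v).length := by simp; omega
          have hdropK : (l ++ '\n' :: v).drop K = v.drop (f.toNat + 11) := by
            have h1 : l ++ '\n' :: v = (l ++ ['\n']) ++ v := by simp
            have h2 : K = (l ++ ['\n']).length + (f.toNat + 11) := by simp [hK]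
            rw [h1, h2, List.drop_length_add_append]
          rw [hcast1, hcast2,
            PySem.Chars.findFrom_natCast _ ['\n'] K hKlen,
            PySem.Chars.findFrom_natCast _ ['\n'] (f.toNat + 11) hkf, hdropK]
          by_cases hnl : PySem.Chars.find (v.drop (f.toNat + 11)) ['\n'] = -1
          · rw [if_pos hnl]; rw [if_pos hnl]
            rw [if_pos (show (-1 : Int) < 0 by norm_num)]
            rw [if_pos (show (-1 : Int) < 0 by norm_num)]
            have hA : PySem.Chars.slice (l ++ '\n' :: v) (some ((K : Nat) : Int)) none
                = v.drop (f.toNat + 11) := by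
              simp only [PySem.Chars.slice_eq_listSlice, PySem.List.slice_from_natCast]
              exact hdropK
            have hB : PySem.Chars.slice v (some ((f.toNat + 11 : Nat) : Int)) none
                = v.drop (f.toNat + 11) := by
              simp only [PySem.Chars.slice_eq_listSlice, PySem.List.slice_from_natCast]
            rw [hA, hB]
          · rw [if_neg hnl]; rw [if_neg hnl]
            set g := PySem.Chars.find (v.drop (f.toNat + 11)) ['\n'] with hgdef
            have hg0 : 0 ≤ g := by
              have := PySem.Chars.neg_one_le_find (s := v.drop (f.toNat + 11)) (sub := ['\n'])
              omega
            rw [if_neg (show ¬(((f.toNat + 11 : Nat) : Int) + g < 0) by omega)]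
            rw [if_neg (show ¬(((K : Nat) : Int) + g < 0) by omega)]
            have hgcast : g = ((g.toNat : Nat) : Int) := by omega
            have hA : PySem.Chars.slice (l ++ '\n' :: v) (some ((K : Nat) : Int))
                (some (((K : Nat) : Int) + g)) = (v.drop (f.toNat + 11)).take g.toNat := by
              simp only [PySem.Chars.slice_eq_listSlice]
              rw [hgcast, PySem.List.slice_natCast_add, hdropK]
              simp
              try omega
            have hB : PySem.Chars.slice v (some ((f.toNat + 11 : Nat) : Int))
                (some (((f.toNat + 11 : Nat) : Int) + g)) = (v.drop (f.toNat + 11)).take g.toNat := by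
              simp only [PySem.Chars.slice_eq_listSlice]
              rw [hgcast, PySem.List.slice_natCast_add]
              simp
              try omega
            rw [hA, hB]
        · rw [find_pat_none hninf (not_infix_of_find_neg hg),
            if_pos (show (-1 : Int) < 0 by norm_num),
            if_pos (show PySem.Chars.find v errPat < 0 by omega)]

-- ===== VERDICT (by name: the statement is the Claim_ definition above) =====
theorem get_transfer_err_spec : Claim_equal_get_transfer_err := by
  intro adb_out _
  unfold Spec_get_transfer_err
  rw [alt_eq_bCore, get_transfer_err]
  rw [nlStr_eq, splitOn_eq_splitNl,
    loop_eq_bCore _ (splitNl_ne_nil _) (fun l hl => nl_notMem_of_mem_splitNl hl),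
    joinNl_splitNl]
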